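-- pv_equiv track=rewrite | github.com/kapforty/leetcode | python3/2441.py | findMaxK
-- ===== SOURCE A (Python) =====
-- from typing import List
--
-- def findMaxK(nums: List[int]) -> int:
--     res = -1
--     visited = set()
--     for num in nums:
--         if -num in visited:
--             res = max(res, abs(num))
--         visited.add(num)
--     return res
-- ===== SOURCE B (Python) =====
-- def findMaxK(nums):
--     a = sorted(nums)
--     res = -1
--     l, r = 0, len(a) - 1
--     while l < r:
--         s = a[l] + a[r]
--         if s == 0:
--             res = max(res, a[r])
--             l += 1
--             r -= 1
--         elif s < 0:
--             l += 1
--         else: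
--             r -= 1
--     return res
-- ===== Notes on version B (the rewrite author's own statement) =====
-- stated objective: alternative
-- what changed: Replaces A's single hash-set pass with a sort followed by a two-pointer scan from both ends of the sorted array, matching negatives by pair sums instead of set membership.
import Mathlib
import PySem

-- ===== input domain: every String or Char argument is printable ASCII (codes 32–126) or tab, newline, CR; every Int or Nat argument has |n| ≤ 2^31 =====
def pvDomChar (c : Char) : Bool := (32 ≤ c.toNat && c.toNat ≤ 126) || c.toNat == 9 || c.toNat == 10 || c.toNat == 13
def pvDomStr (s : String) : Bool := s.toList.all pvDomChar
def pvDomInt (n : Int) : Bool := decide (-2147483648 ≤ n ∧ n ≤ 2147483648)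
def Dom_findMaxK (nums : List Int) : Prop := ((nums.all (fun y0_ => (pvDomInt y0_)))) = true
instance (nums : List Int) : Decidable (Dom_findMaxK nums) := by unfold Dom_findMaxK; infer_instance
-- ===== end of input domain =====

-- B replaces A's hash-set pass with sort + two-pointer scan from both ends (alternative algorithm; B does not mutate its argument: it uses sorted()).

-- ===== PORT A =====
def findMaxK (nums : List Int) : Int :=
  (nums.foldl
    (fun (st : Int × PySem.Set Int) num =>
      ((if PySem.Set.contains st.2 (-num) then max st.1 |num| else st.1),
        PySem.Set.add st.2 num))
    ((-1 : Int), PySem.Set.empty)).1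

-- ===== PORT B =====
-- the while-loop of Source B; a[l], a[r] are always in range when l < r ≤ len-1, so getD is exact there
def pvGo (a : List Int) (l r : Nat) (res : Int) : Int :=
  if l < r then
    let s := a.getD l 0 + a.getD r 0
    if s = 0 then pvGo a (l + 1) (r - 1) (max res (a.getD r 0))
    else if s < 0 then pvGo a (l + 1) r res
    else pvGo a l (r - 1) res
  else res
termination_by r - l

def findMaxK_alt (nums : List Int) : Int :=
  let a := PySem.List.sorted nums (fun x => x) false
  pvGo a 0 (a.length - 1) (-1)

-- ===== PRECONDITION & SPEC =====
def Spec_findMaxK (nums : List Int) (out : Int) : Prop := out = findMaxK_alt nums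
instance (nums : List Int) (out : Int) : Decidable (Spec_findMaxK nums out) := by unfold Spec_findMaxK; infer_instance

-- ===== CLAIM (what is proved, stated in full; the proofs are below) =====
def Claim_equal_findMaxK : Prop := ∀ (nums : List Int), Dom_findMaxK nums → Spec_findMaxK nums (findMaxK nums)

-- ===== LEMMAS AND PROOFS =====

-- the common characterisation: the values both programs maximise over
def pvGood (nums : List Int) (x : Int) : Prop :=
  (0 < x ∧ x ∈ nums ∧ -x ∈ nums) ∨ (x = 0 ∧ 2 ≤ nums.count (0 : Int))

lemma pvGood_nonneg {nums : List Int} {x : Int} (h : pvGood nums x) : 0 ≤ x := by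
  rcases h with ⟨h, _⟩ | ⟨h, _⟩ <;> omega

-- ---------- A side (growing visited-set pass) ----------

-- the values |num| that A's loop feeds into max: those num whose negation occurred earlier (p = prefix already seen)
def pvCands (p l : List Int) : List Int :=
  match l with
  | [] => []
  | a :: t => (if -a ∈ p then [|a|] else []) ++ pvCands (p ++ [a]) t

lemma pvA_fold (l : List Int) (p : List Int) (r : Int) :
    (l.foldl
      (fun (st : Int × PySem.Set Int) num =>
        ((if PySem.Set.contains st.2 (-num) then max st.1 |num| else st.1),
          PySem.Set.add st.2 num))
      (r, PySem.Set.ofList p)).1 = (pvCands p l).foldl max r := by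
  induction l generalizing p r with
  | nil => simp [pvCands]
  | cons a t ih =>
    simp only [List.foldl_cons, pvCands]
    by_cases h : (-a) ∈ p
    · rw [if_pos (by simpa [PySem.Set.contains_iff, PySem.Set.mem_ofList] using h),
        ← PySem.Set.ofList_append_singleton, ih]
      simp [h]
    · rw [if_neg (by simpa [PySem.Set.contains_iff, PySem.Set.mem_ofList] using h),
        ← PySem.Set.ofList_append_singleton, ih]
      simp [h]

lemma pvA_eq (nums : List Int) :
    findMaxK nums = (pvCands [] nums).foldl max (-1) := by
  have := pvA_fold nums [] (-1)
  simpa [findMaxK, PySem.Set.ofList] using this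

-- every candidate A maxes over is a positive matched value, or 0 with two zeros present
lemma pvCands_sub (p l : List Int) (x : Int) (hx : x ∈ pvCands p l) :
    (0 < x ∧ x ∈ p ++ l ∧ -x ∈ p ++ l) ∨ (x = 0 ∧ 2 ≤ (p ++ l).count (0 : Int)) := by
  induction l generalizing p with
  | nil => simp [pvCands] at hx
  | cons a t ih =>
    simp only [pvCands, List.mem_append] at hx
    rcases hx with hx | hx
    · by_cases h : (-a) ∈ p
      · rw [if_pos h] at hx
        simp only [List.mem_singleton] at hx
        subst hx
        by_cases ha : a = 0
        · right
          subst ha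
          refine ⟨rfl, ?_⟩
          have h1 : (1 : ℕ) ≤ p.count (0 : Int) := List.count_pos_iff.2 (by simpa using h)
          simp only [List.count_append, List.count_cons_self]
          omega
        · left
          refine ⟨by positivity, ?_, ?_⟩ <;>
            rcases abs_choice a with h' | h' <;> simp [h', h]
      · rw [if_neg h] at hx; simp at hx
    · have := ih (p ++ [a]) hx
      have hperm : (p ++ [a]) ++ t = p ++ (a :: t) := by simp
      rw [hperm] at this
      exact this

-- two zeros in p++l with one of them in l force 0 into the candidates
lemma pvCands_zero (p l : List Int) (hl : (0 : Int) ∈ l)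
    (h : (0 : Int) ∈ p ∨ 2 ≤ l.count (0 : Int)) : (0 : Int) ∈ pvCands p l := by
  induction l generalizing p with
  | nil => simp at hl
  | cons a t ih =>
    simp only [pvCands, List.mem_append]
    by_cases ha : a = 0
    · subst ha
      rcases h with h | h
      · left; simp [h]
      · have ht : (0 : Int) ∈ t := by
          rw [List.count_cons_self] at h
          exact List.count_pos_iff.1 (by omega)
        right; exact ih (p ++ [0]) ht (Or.inl (by simp))
    · have hl' : (0 : Int) ∈ t := by
        rcases List.mem_cons.1 hl with h' | h'
        · exact absurd h'.symm ha
        · exact h'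
      rcases h with h | h
      · right; exact ih (p ++ [a]) hl' (Or.inl (by simp [h]))
      · right
        refine ih (p ++ [a]) hl' (Or.inr ?_)
        simpa [List.count_cons, ha] using h

-- a positive matched value is among the candidates
lemma pvCands_pos (x : Int) (hx : 0 < x) :
    ∀ (l p : List Int), ((x ∈ l ∧ -x ∈ p ++ l) ∨ (-x ∈ l ∧ x ∈ p)) → x ∈ pvCands p l := by
  intro l
  induction l with
  | nil => intro p h; simp at h
  | cons a t ih =>
    intro p h
    have hne : x ≠ -x := by omega
    simp only [pvCands, List.mem_append]
    by_cases hax : a = x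
    · subst hax
      by_cases hp : (-a) ∈ p
      · left; simp [hp, abs_of_pos hx]
      · right
        apply ih (p ++ [a])
        rcases h with ⟨_, hmem⟩ | ⟨hm, hxp⟩
        · right
          constructor
          · rcases (List.mem_append.1 hmem) with h' | h'
            · exact absurd h' hp
            · rcases List.mem_cons.1 h' with h' | h'
              · exact absurd h'.symm hne
              · exact h'
          · simp
        · right
          constructor
          · rcases List.mem_cons.1 hm with h' | h'
            · exact absurd h'.symm hne
            · exact h'
          · simp
    · by_cases haxn : a = -x
      · subst haxn
        by_cases hp : x ∈ p
        · left; rw [if_pos (by simpa using hp)]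
          simp [abs_of_nonpos (by omega : -x ≤ 0)]
        · right
          apply ih (p ++ [-x])
          rcases h with ⟨hm, _⟩ | ⟨_, hxp⟩
          · left
            constructor
            · rcases List.mem_cons.1 hm with h' | h'
              · exact absurd h' hne
              · exact h'
            · simp
          · exact absurd hxp hp
      · right
        apply ih (p ++ [a])
        rcases h with ⟨hm, hmem⟩ | ⟨hm, hxp⟩
        · left
          refine ⟨?_, ?_⟩
          · rcases List.mem_cons.1 hm with h' | h'
            · exact absurd h'.symm hax
            · exact h'
          · rcases List.mem_append.1 hmem with h' | h'
            · simp [h']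
            · rcases List.mem_cons.1 h' with h' | h'
              · exact absurd h'.symm (by simpa [eq_comm, neg_eq_iff_eq_neg] using haxn)
              · simp [h']
        · right
          refine ⟨?_, by simp [hxp]⟩
          rcases List.mem_cons.1 hm with h' | h'
          · exact absurd h'.symm (by simpa [eq_comm, neg_eq_iff_eq_neg] using haxn)
          · exact h'

lemma pvA_char (nums : List Int) :
    (findMaxK nums = -1 ∨ pvGood nums (findMaxK nums)) ∧
      (∀ x, pvGood nums x → x ≤ findMaxK nums) := by
  rw [pvA_eq]
  constructor
  · rcases PySem.List.foldl_max_mem (pvCands [] nums) (-1) with h | h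
    · exact Or.inl h
    · right
      have := pvCands_sub [] nums _ h
      simpa [pvGood] using this
  · intro x hx
    rcases hx with ⟨hpos, hm, hnm⟩ | ⟨h0, hc⟩
    · exact (PySem.List.le_foldl_max _ _).2 _ (pvCands_pos x hpos nums [] (Or.inl ⟨hm, by simpa using hnm⟩))
    · subst h0
      have h0m : (0 : Int) ∈ nums := List.count_pos_iff.1 (by omega)
      exact (PySem.List.le_foldl_max _ _).2 _ (pvCands_zero [] nums h0m (Or.inr hc))

-- ---------- B side (two pointers over the sorted list) ----------

-- a zero-sum pair inside the window [l, r] whose larger element is x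
def pvWGood (a : List Int) (l r : Nat) (x : Int) : Prop :=
  ∃ i j : Nat, l ≤ i ∧ i < j ∧ j ≤ r ∧
    a.getD i 0 + a.getD j 0 = 0 ∧ a.getD j 0 = x

lemma pvWGood_mono {a : List Int} {l r l' r' : Nat} {x : Int}
    (hl : l ≤ l') (hr : r' ≤ r) (h : pvWGood a l' r' x) : pvWGood a l r x := by
  obtain ⟨i, j, h1, h2, h3, h4, h5⟩ := h
  exact ⟨i, j, by omega, h2, by omega, h4, h5⟩

lemma pvGo_le (a : List Int) (l r : Nat) (res : Int) : res ≤ pvGo a l r res := by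
  induction l, r, res using pvGo.induct a with
  | case1 l r res hlr s hs ih => rw [pvGo, if_pos hlr, if_pos hs]; exact le_trans (le_max_left _ _) ih
  | case2 l r res hlr s hs hs' ih => rw [pvGo, if_pos hlr, if_neg hs, if_pos hs']; exact ih
  | case3 l r res hlr s hs hs' ih => rw [pvGo, if_pos hlr, if_neg hs, if_neg hs']; exact ih
  | case4 l r res hlr => rw [pvGo, if_neg hlr]

lemma pvGo_mem (a : List Int) (l r : Nat) (res : Int) :
    pvGo a l r res = res ∨ pvWGood a l r (pvGo a l r res) := by
  induction l, r, res using pvGo.induct a with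
  | case1 l r res hlr s hs ih =>
    rw [pvGo, if_pos hlr, if_pos hs]
    rcases ih with h | h
    · rcases max_choice res (a.getD r 0) with h' | h'
      · left; rw [h, h']
      · right
        rw [h, h']
        exact ⟨l, r, le_refl l, hlr, le_refl r, hs, rfl⟩
    · exact Or.inr (pvWGood_mono (Nat.le_add_right l 1) (Nat.sub_le r 1) h)
  | case2 l r res hlr s hs hs' ih =>
    rw [pvGo, if_pos hlr, if_neg hs, if_pos hs']
    rcases ih with h | h
    · exact Or.inl h
    · exact Or.inr (pvWGood_mono (Nat.le_add_right l 1) (le_refl r) h)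
  | case3 l r res hlr s hs hs' ih =>
    rw [pvGo, if_pos hlr, if_neg hs, if_neg hs']
    rcases ih with h | h
    · exact Or.inl h
    · exact Or.inr (pvWGood_mono (le_refl l) (Nat.sub_le r 1) h)
  | case4 l r res hlr => rw [pvGo, if_neg hlr]; exact Or.inl rfl

lemma pvSorted_mono {a : List Int} (hs : a.Pairwise (· ≤ ·)) {i j : Nat}
    (hij : i ≤ j) (hj : j < a.length) : a.getD i 0 ≤ a.getD j 0 := by
  rcases Nat.lt_or_ge i j with h | h
  · rw [List.getD_eq_getElem a 0 (by omega), List.getD_eq_getElem a 0 hj]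
    exact (List.pairwise_iff_getElem.1 hs) i j (by omega) hj h
  · have : i = j := by omega
    subst this
    exact le_refl _

lemma pvGo_ub (a : List Int) (hs : a.Pairwise (· ≤ ·)) (l r : Nat) (res : Int)
    (hr : r < a.length) :
    ∀ x, pvWGood a l r x → x ≤ pvGo a l r res := by
  induction l, r, res using pvGo.induct a with
  | case1 l r res hlr s hzero ih =>
    intro x hx
    rw [pvGo, if_pos hlr, if_pos hzero]
    obtain ⟨i, j, h1, h2, h3, _, h5⟩ := hx
    have : x ≤ a.getD r 0 := h5 ▸ pvSorted_mono hs h3 hr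
    calc x ≤ max res (a.getD r 0) := le_trans this (le_max_right _ _)
      _ ≤ _ := pvGo_le a (l+1) (r-1) _
  | case2 l r res hlr s hzero hneg ih =>
    intro x hx
    rw [pvGo, if_pos hlr, if_neg hzero, if_pos hneg]
    refine ih hr x ?_
    obtain ⟨i, j, h1, h2, h3, h4, h5⟩ := hx
    refine ⟨i, j, ?_, h2, h3, h4, h5⟩
    by_contra hi
    have hil : i = l := by omega
    subst hil
    have hjr : a.getD j 0 ≤ a.getD r 0 := pvSorted_mono hs h3 hr
    simp only [s] at hneg
    omega
  | case3 l r res hlr s hzero hpos ih =>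
    intro x hx
    rw [pvGo, if_pos hlr, if_neg hzero, if_neg hpos]
    refine ih (by omega) x ?_
    obtain ⟨i, j, h1, h2, h3, h4, h5⟩ := hx
    refine ⟨i, j, h1, h2, ?_, h4, h5⟩
    by_contra hj
    have hjr : j = r := by omega
    subst hjr
    have hil : a.getD l 0 ≤ a.getD i 0 := pvSorted_mono hs h1 (by omega)
    simp only [s] at hzero hpos
    omega
  | case4 l r res hlr =>
    intro x hx
    obtain ⟨i, j, h1, h2, h3, _, _⟩ := hx
    omega

-- membership at in-range positions, getD form
lemma pvMem_getD (a : List Int) (v : Int) (h : v ∈ a) :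
    ∃ k, k < a.length ∧ a.getD k 0 = v := by
  obtain ⟨k, hk, hv⟩ := List.mem_iff_getElem.1 h
  exact ⟨k, hk, by rw [List.getD_eq_getElem _ _ hk]; exact hv⟩

lemma pvGetD_mem (a : List Int) (k : Nat) (hk : k < a.length) : a.getD k 0 ∈ a := by
  rw [List.getD_eq_getElem _ _ hk]
  exact List.getElem_mem hk

-- count ≥ 2 ↔ two distinct in-range positions carry the value
lemma pvTwo_of_count (a : List Int) (v : Int) (h : 2 ≤ a.count v) :
    ∃ i j : Nat, i < j ∧ j < a.length ∧ a.getD i 0 = v ∧ a.getD j 0 = v := by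
  induction a with
  | nil => simp at h
  | cons b t ih =>
    by_cases hb : b = v
    · subst hb
      have h1 : 1 ≤ t.count b := by
        rw [List.count_cons_self] at h; omega
      have hm : b ∈ t := List.count_pos_iff.1 (by omega)
      obtain ⟨k, hk, hv⟩ := pvMem_getD t b hm
      exact ⟨0, k + 1, by omega, by simp; omega, by simp, by simpa using hv⟩
    · have h2 : 2 ≤ t.count v := by
        rw [List.count_cons_of_ne hb] at h; exact h
      obtain ⟨i, j, h1', h2', h3', h4'⟩ := ih h2
      exact ⟨i + 1, j + 1, by omega, by simp; omega, by simpa using h3', by simpa using h4'⟩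

lemma pvCount_of_two (a : List Int) (v : Int) (i j : Nat) (hij : i < j)
    (hj : j < a.length) (hi : a.getD i 0 = v) (hjv : a.getD j 0 = v) :
    2 ≤ a.count v := by
  induction a generalizing i j with
  | nil => simp at hj
  | cons b t ih =>
    obtain ⟨j', rfl⟩ : ∃ j', j = j' + 1 := ⟨j - 1, by omega⟩
    have hj' : t.getD j' 0 = v := by simpa using hjv
    have hjl : j' < t.length := by simp at hj; omega
    rcases Nat.eq_zero_or_pos i with h0 | h0
    · subst h0
      have hb : b = v := by simpa using hi
      have : 1 ≤ t.count v := List.count_pos_iff.2 (hj' ▸ pvGetD_mem t j' hjl)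
      rw [hb, List.count_cons_self]
      omega
    · obtain ⟨i', rfl⟩ : ∃ i', i = i' + 1 := ⟨i - 1, by omega⟩
      have hi' : t.getD i' 0 = v := by simpa using hi
      have := ih i' j' (by omega) hjl hi' hj'
      rw [List.count_cons]
      omega

lemma pvWGood_iff (nums : List Int) (x : Int) :
    pvWGood (PySem.List.sorted nums (fun x => x) false) 0
        ((PySem.List.sorted nums (fun x => x) false).length - 1) x ↔ pvGood nums x := by
  set a := PySem.List.sorted nums (fun x => x) false with ha
  have hperm : a.Perm nums := PySem.List.sorted_perm nums (fun x => x) false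
  have hsrt : a.Pairwise (· ≤ ·) := by
    have := PySem.List.sorted_pairwise nums (fun x => x)
    simpa [← ha] using this
  have hmem : ∀ y : Int, y ∈ a ↔ y ∈ nums := fun y => hperm.mem_iff
  have hcnt : a.count (0 : Int) = nums.count 0 := hperm.count_eq 0
  constructor
  · rintro ⟨i, j, -, hij, hjr, hsum, hval⟩
    have hlen : 0 < a.length := by
      by_contra hl
      have : a.length = 0 := by omega
      omega
    have hjlt : j < a.length := by omega
    have hile : a.getD i 0 ≤ a.getD j 0 := pvSorted_mono hsrt (by omega) hjlt
    have hx0 : 0 ≤ x := by omega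
    rcases eq_or_lt_of_le hx0 with h0 | hpos
    · right
      refine ⟨h0.symm, ?_⟩
      rw [← hcnt]
      exact pvCount_of_two a 0 i j hij hjlt (by omega) (by omega)
    · left
      refine ⟨hpos, ?_, ?_⟩
      · rw [← hmem, ← hval]
        exact pvGetD_mem a j hjlt
      · rw [← hmem]
        have : a.getD i 0 = -x := by omega
        rw [← this]
        exact pvGetD_mem a i (by omega)
  · rintro (⟨hpos, hm, hnm⟩ | ⟨h0, hc⟩)
    · obtain ⟨q, hq, hqv⟩ := List.mem_iff_getElem.1 ((hmem x).2 hm)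
      obtain ⟨p, hp, hpv⟩ := List.mem_iff_getElem.1 ((hmem (-x)).2 hnm)
      have hqd : a.getD q 0 = x := by rw [List.getD_eq_getElem _ 0 hq]; exact hqv
      have hpd : a.getD p 0 = -x := by rw [List.getD_eq_getElem _ 0 hp]; exact hpv
      have hpq : p < q := by
        by_contra hle
        have : a.getD q 0 ≤ a.getD p 0 := pvSorted_mono hsrt (by omega) hp
        omega
      exact ⟨p, q, Nat.zero_le p, hpq, by omega, by omega, hqd⟩
    · subst h0
      obtain ⟨i, j, hij, hjl, hi0, hj0⟩ := pvTwo_of_count a 0 (by omega)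
      exact ⟨i, j, Nat.zero_le i, hij, by omega, by omega, hj0⟩

lemma pvB_char (nums : List Int) :
    (findMaxK_alt nums = -1 ∨ pvGood nums (findMaxK_alt nums)) ∧
      (∀ x, pvGood nums x → x ≤ findMaxK_alt nums) := by
  unfold findMaxK_alt
  set a := PySem.List.sorted nums (fun x => x) false with ha
  have hsrt : a.Pairwise (· ≤ ·) := by
    have := PySem.List.sorted_pairwise nums (fun x => x)
    simpa [← ha] using this
  by_cases hn : a.length = 0
  · have hanil : a = [] := List.length_eq_zero_iff.1 hn
    have hnnil : nums = [] := by
      have := PySem.List.sorted_perm nums (fun x => x) false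
      rw [← ha, hanil] at this
      exact (List.Perm.nil_eq this).symm
    constructor
    · left
      rw [hanil, pvGo]
      simp
    · intro x hx
      rcases hx with ⟨_, hm, _⟩ | ⟨_, hc⟩
      · simp [hnnil] at hm
      · simp [hnnil] at hc
  · have hr : a.length - 1 < a.length := by omega
    constructor
    · rcases pvGo_mem a 0 (a.length - 1) (-1) with h | h
      · exact Or.inl h
      · exact Or.inr ((pvWGood_iff nums _).1 h)
    · intro x hx
      exact pvGo_ub a hsrt 0 (a.length - 1) (-1) hr x ((pvWGood_iff nums x).2 hx)

lemma pv_main (nums : List Int) : findMaxK nums = findMaxK_alt nums := by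
  obtain ⟨hA1, hA2⟩ := pvA_char nums
  obtain ⟨hB1, hB2⟩ := pvB_char nums
  rcases hA1 with hA | hA <;> rcases hB1 with hB | hB
  · rw [hA, hB]
  · have h1 := hA2 _ hB
    have h2 := pvGood_nonneg hB
    omega
  · have h1 := hB2 _ hA
    have h2 := pvGood_nonneg hA
    omega
  · exact le_antisymm (hB2 _ hA) (hA2 _ hB)

-- ===== VERDICT (by name: the statement is the Claim_ definition above) =====
theorem findMaxK_spec : Claim_equal_findMaxK := by
  intro nums _
  unfold Spec_findMaxK
  exact pv_main nums
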